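-- pv_equiv track=rewrite | github.com/lluisgomez/TextTopicNet | wikipedia_data/get_images.py | article_im_dir
-- ===== SOURCE A (Python) =====
-- def article_im_dir(list_of_images, root_dir):
-- 	article_im_dir = {}
-- 	for given_im in list_of_images:
-- 		im_article_num = given_im.split('/')[2].split('#')[0]
-- 		try:
-- 			article_im_dir[im_article_num].append(root_dir+given_im)
-- 		except KeyError:
-- 			article_im_dir[im_article_num] = [root_dir+given_im]
-- 	return article_im_dir
-- ===== SOURCE B (Python) =====
-- def article_im_dir(list_of_images, root_dir):
--     keys = []
--     for im in list_of_images: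
--         k = im.split('/')[2].split('#')[0]
--         if k not in keys:
--             keys.append(k)
--     return {k: [root_dir + im for im in list_of_images
--                 if im.split('/')[2].split('#')[0] == k]
--             for k in keys}
-- ===== Notes on version B (the rewrite author's own statement) =====
-- stated objective: alternative
-- what changed: Replaces the single-pass dict-with-KeyError accumulation by a two-phase shape: first collect the distinct article keys in order of first occurrence, then build the result as a dict comprehension that filters the whole list per key; no exception handling and no mutable dict state.
import Mathlib
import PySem

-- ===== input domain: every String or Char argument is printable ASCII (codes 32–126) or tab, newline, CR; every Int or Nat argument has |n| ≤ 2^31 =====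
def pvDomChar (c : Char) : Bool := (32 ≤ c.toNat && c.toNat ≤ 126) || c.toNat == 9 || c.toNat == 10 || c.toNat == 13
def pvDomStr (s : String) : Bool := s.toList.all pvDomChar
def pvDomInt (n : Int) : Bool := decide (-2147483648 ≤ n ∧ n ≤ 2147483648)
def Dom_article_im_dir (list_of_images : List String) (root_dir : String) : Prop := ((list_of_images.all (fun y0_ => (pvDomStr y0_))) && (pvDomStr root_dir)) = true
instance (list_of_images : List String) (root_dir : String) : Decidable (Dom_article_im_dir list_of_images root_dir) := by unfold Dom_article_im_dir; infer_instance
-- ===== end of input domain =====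

-- B builds the result in two phases (distinct keys in first-occurrence order, then a
-- per-key filter comprehension) instead of A's single pass with a KeyError-driven dict;
-- objective: alternative (same values, genuinely different shape; not claimed faster).

-- shared key computation: given_im.split('/')[2].split('#')[0]
-- (the '.getD ""' arm is unreachable under Pre_: Python raises IndexError exactly when
--  the string has fewer than two '/'; '[0]' of a split result always exists)
def pvKeyOf (s : String) : String :=
  -- split? returns none only for an empty separator; "/" and "#" are nonempty, so .getD [] is exact
  (((PySem.Str.split? ((PySem.List.pyGet? ((PySem.Str.split? s "/").getD []) 2).getD "") "#").getD []).headD "")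

-- ===== PORT A =====
def article_im_dir (list_of_images : List String) (root_dir : String) : List (String × List String) :=
  (list_of_images.foldl
    (fun d given_im => d.modify (pvKeyOf given_im) [] (fun v => v ++ [root_dir ++ given_im]))
    PySem.Dict.empty).items

-- ===== PORT B =====
def article_im_dir_alt (list_of_images : List String) (root_dir : String) : List (String × List String) :=
  let keys := list_of_images.foldl
    (fun ks im => if pvKeyOf im ∈ ks then ks else ks ++ [pvKeyOf im]) ([] : List String)
  keys.map (fun k =>
    (k, (list_of_images.filter (fun im => pvKeyOf im == k)).map (fun im => root_dir ++ im)))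

-- ===== PRECONDITION & SPEC =====
-- Pre_ excludes exactly the inputs where Python A raises IndexError: a string with
-- fewer than two '/' makes given_im.split('/')[2] fail.
def Pre_article_im_dir (list_of_images : List String) (root_dir : String) : Prop :=
  ∀ s ∈ list_of_images, 2 ≤ PySem.Str.count s "/"
instance (list_of_images : List String) (root_dir : String) : Decidable (Pre_article_im_dir list_of_images root_dir) := by unfold Pre_article_im_dir; infer_instance

def pvWitness_article_im_dir : List String × String := (["images/04/123#1.jpg", "images/04/123#2.jpg", "images/05/77.jpg"], "root/")

def Spec_article_im_dir (list_of_images : List String) (root_dir : String) (out : List (String × List String)) : Prop := out = article_im_dir_alt list_of_images root_dir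
instance (list_of_images : List String) (root_dir : String) (out : List (String × List String)) : Decidable (Spec_article_im_dir list_of_images root_dir out) := by unfold Spec_article_im_dir; infer_instance

-- ===== CLAIM (what is proved, stated in full; the proofs are below) =====
def Claim_equal_article_im_dir : Prop := ∀ (list_of_images : List String) (root_dir : String), Dom_article_im_dir list_of_images root_dir → Pre_article_im_dir list_of_images root_dir → Spec_article_im_dir list_of_images root_dir (article_im_dir list_of_images root_dir)

-- ===== LEMMAS AND PROOFS =====

-- B's key-collecting loop is set(xs)-style dedup of the mapped keys
theorem pv_keys_eq (l : List String) :
    l.foldl (fun ks im => if pvKeyOf im ∈ ks then ks else ks ++ [pvKeyOf im]) ([] : List String)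
      = PySem.Set.ofList (l.map pvKeyOf) := by
  rw [PySem.Set.ofList_eq_foldl, List.foldl_map]
  apply PySem.List.foldl_congr_mem
  intro ks im _
  simp [PySem.Set.add, PySem.Set.contains]

-- A's dict after the loop, read at any key
theorem pv_getD_eq (l : List String) (r : String) (k : String) :
    (l.foldl (fun d im => d.modify (pvKeyOf im) [] (fun v => v ++ [r ++ im])) PySem.Dict.empty).getD k []
      = (l.filter (fun im => pvKeyOf im == k)).map (fun im => r ++ im) := by
  have h := PySem.Dict.getD_foldl_modify_append
    (l := l.map (fun im => (pvKeyOf im, r ++ im))) (d := PySem.Dict.empty) (c := k)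
  rw [List.foldl_map] at h
  simpa [List.filter_map, List.map_map, Function.comp] using h

theorem pv_main (l : List String) (r : String) :
    article_im_dir l r = article_im_dir_alt l r := by
  unfold article_im_dir article_im_dir_alt
  set d := l.foldl (fun d im => d.modify (pvKeyOf im) [] (fun v => v ++ [r ++ im])) PySem.Dict.empty with hd
  have hnd : d.keys.Nodup := by
    rw [hd]
    exact PySem.Dict.nodup_keys_foldl_modify_key l pvKeyOf [] _ _ (by simp)
  have hkeys : d.keys = PySem.Set.ofList (l.map pvKeyOf) := by
    rw [hd, PySem.Dict.keys_foldl_modify_key]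
    simp [PySem.Set.update, PySem.Set.ofList_eq_foldl, PySem.Dict.keys_empty]
  rw [PySem.Dict.items_eq_map_keys d hnd ([] : List String), hkeys, pv_keys_eq]
  apply List.map_congr_left
  intro k _
  simp [hd, pv_getD_eq]

-- ===== VERDICT (by name: the statement is the Claim_ definition above) =====
theorem article_im_dir_spec : Claim_equal_article_im_dir := by
  intro l r _ _
  unfold Spec_article_im_dir
  exact pv_main l r
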